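-- pv_equiv track=rewrite | github.com/QuyHoang7703/PBL5_KTMT | test_camera_4.py | format_license_plate
-- ===== SOURCE A (Python) =====
-- def format_license_plate(candidates):
--     first_line = []
--     second_line = []
--     candidates = sorted(candidates, key=lambda x: x[1][1])  # Sắp xếp theo tọa độ y
--     threshold_y = candidates[0][1][1] + 40  # Ngưỡng cho dòng đầu tiên
--
--     for candidate, (x, y) in candidates:
--         if y < threshold_y:
--             first_line.append((candidate, x))
--         else:
--             second_line.append((candidate, x))
--
--     first_line = sorted(first_line, key=lambda x: x[1])  # Sắp xếp lại theo tọa độ x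
--     second_line = sorted(second_line, key=lambda x: x[1])
--
--     if len(second_line) == 0:
--         license_plate = "".join([str(ele[0]) for ele in first_line])
--     else:
--         license_plate = "".join([str(ele[0]) for ele in first_line]) + "-" + "".join([str(ele[0]) for ele in second_line])
--     return license_plate
-- ===== SOURCE B (Python) =====
-- def format_license_plate(candidates):
--     # One sort of the whole list by the composite key (row, x, y); the dash is
--     # emitted in the same single pass that joins the characters, when the
--     # second row starts. No partition lists, no per-line sorts.
--     threshold = min(y for _, (_, y) in candidates) + 40
--     order = sorted(candidates, key=lambda c: (c[1][1] >= threshold, c[1][0], c[1][1]))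
--     parts = []
--     seen_second = False
--     for ch, (x, y) in order:
--         if y >= threshold and not seen_second:
--             parts.append('-')
--             seen_second = True
--         parts.append(ch)
--     return "".join(parts)
-- ===== Notes on version B (the rewrite author's own statement) =====
-- stated objective: alternative
-- what changed: A sorts by y, partitions into two line lists, sorts each by x and concatenates conditionally; B does one sort of the whole list by the composite key (row, x, y) (row = y >= min_y + 40 from a single min-scan) and emits characters and the dash in one output pass with a flag; Pre_ excludes only the empty list, on which both raise.
import Mathlib
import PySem

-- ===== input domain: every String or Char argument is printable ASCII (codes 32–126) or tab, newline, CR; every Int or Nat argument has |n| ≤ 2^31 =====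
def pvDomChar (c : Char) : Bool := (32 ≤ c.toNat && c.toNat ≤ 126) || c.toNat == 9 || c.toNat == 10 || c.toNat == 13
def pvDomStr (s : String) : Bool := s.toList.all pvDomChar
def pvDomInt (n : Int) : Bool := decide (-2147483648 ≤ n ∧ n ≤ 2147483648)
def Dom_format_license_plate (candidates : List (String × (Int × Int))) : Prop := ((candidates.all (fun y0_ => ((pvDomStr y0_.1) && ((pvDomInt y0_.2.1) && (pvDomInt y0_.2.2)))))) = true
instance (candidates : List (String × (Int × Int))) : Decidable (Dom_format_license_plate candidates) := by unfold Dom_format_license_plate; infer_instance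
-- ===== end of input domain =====

-- B replaces A's sort-by-y + two-list partition + per-line x-sorts + conditional
-- concatenation with one sort by the composite key (row, x, y) and a single output
-- pass that emits the dash when the second row starts; proved equal on nonempty input.

-- ===== PORT A =====
def format_license_plate (candidates : List (String × (Int × Int))) : String :=
  let cs := PySem.List.sorted candidates (fun c => c.2.2)
  match PySem.List.pyGet? cs 0 with
  | none => ""   -- candidates[0] raises IndexError in Python; excluded by Pre_
  | some c0 =>
    let threshold_y : Int := c0.2.2 + 40
    let lines :=
      cs.foldl (fun (s : List (String × Int) × List (String × Int)) c =>
        if c.2.2 < threshold_y then (s.1 ++ [(c.1, c.2.1)], s.2)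
        else (s.1, s.2 ++ [(c.1, c.2.1)])) ([], [])
    let first_line := PySem.List.sorted lines.1 (fun e => e.2)
    let second_line := PySem.List.sorted lines.2 (fun e => e.2)
    -- str(ele[0]) on a str is the identity
    if second_line.length = 0 then
      PySem.Str.join "" (first_line.map (fun e => e.1))
    else
      PySem.Str.join "" (first_line.map (fun e => e.1)) ++ "-" ++
        PySem.Str.join "" (second_line.map (fun e => e.1))

-- ===== PORT B =====
def format_license_plate_alt (candidates : List (String × (Int × Int))) : String :=
  match PySem.List.min? (candidates.map (fun c => c.2.2)) (fun v => v) with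
  | none => ""   -- min() of an empty generator raises ValueError in Python; excluded by Pre_
  | some min_y =>
    let threshold : Int := min_y + 40
    -- key=lambda c: (c[1][1] >= threshold, c[1][0], c[1][1]) — a lexicographic tuple key
    let order := PySem.List.sorted candidates
      (fun c => toLex (decide (threshold ≤ c.2.2), toLex (c.2.1, c.2.2)))
    let fin := order.foldl
      (fun (s : List String × Bool) c =>
        let s' := if threshold ≤ c.2.2 ∧ s.2 = false then (s.1 ++ ["-"], true) else s
        (s'.1 ++ [c.1], s'.2)) ([], false)
    PySem.Str.join "" fin.1

-- ===== PRECONDITION & SPEC =====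
-- Pre_ excludes only the empty list, on which A raises IndexError (and B ValueError).
def Pre_format_license_plate (candidates : List (String × (Int × Int))) : Prop := candidates ≠ []
instance (candidates : List (String × (Int × Int))) : Decidable (Pre_format_license_plate candidates) := by unfold Pre_format_license_plate; infer_instance
def pvWitness_format_license_plate : (List (String × (Int × Int))) := [("7", (0, 0))]

def Spec_format_license_plate (candidates : List (String × (Int × Int))) (out : String) : Prop := out = format_license_plate_alt candidates
instance (candidates : List (String × (Int × Int))) (out : String) : Decidable (Spec_format_license_plate candidates out) := by unfold Spec_format_license_plate; infer_instance

-- ===== CLAIM (what is proved, stated in full; the proofs are below) =====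
def Claim_equal_format_license_plate : Prop := ∀ (candidates : List (String × (Int × Int))), Dom_format_license_plate candidates → Pre_format_license_plate candidates → Spec_format_license_plate candidates (format_license_plate candidates)

-- ===== LEMMAS AND PROOFS =====

-- insertBy puts x first when it goes before everything
theorem insertBy_all_before {α : Type} (bef : α → α → Bool) (x : α) (l : List α)
    (h : ∀ z ∈ l, bef x z = true) : PySem.List.insertBy bef x l = x :: l := by
  cases l with
  | nil => rfl
  | cons y ys =>
    show (if bef x y = true then x :: y :: ys else y :: PySem.List.insertBy bef x ys) = _
    rw [if_pos (h y (by simp))]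

-- insertBy only looks at 'before' on the list's elements
theorem insertBy_congr {α : Type} (b1 b2 : α → α → Bool) (x : α) (ys : List α)
    (h : ∀ a ∈ ys, b1 x a = b2 x a) :
    PySem.List.insertBy b1 x ys = PySem.List.insertBy b2 x ys := by
  induction ys with
  | nil => rfl
  | cons y ys ih =>
    show (if b1 x y = true then _ else y :: PySem.List.insertBy b1 x ys)
        = (if b2 x y = true then _ else y :: PySem.List.insertBy b2 x ys)
    rw [h y (by simp), ih (fun a ha => h a (by simp [ha]))]

theorem pairwise_insertBy {α κ : Type} [LinearOrder κ] (key : α → κ) (x : α) (ys : List α)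
    (h : ys.Pairwise (fun a b => key a ≤ key b)) :
    (PySem.List.insertBy (fun a b => decide (key a < key b)) x ys).Pairwise
      (fun a b => key a ≤ key b) := by
  induction ys with
  | nil => simp [PySem.List.insertBy]
  | cons y ys ih =>
    rcases List.pairwise_cons.mp h with ⟨hy, hys⟩
    show List.Pairwise _ (if decide (key x < key y) = true then x :: y :: ys
        else y :: PySem.List.insertBy (fun a b => decide (key a < key b)) x ys)
    split_ifs with hlt
    · rw [decide_eq_true_eq] at hlt
      refine List.pairwise_cons.mpr ⟨?_, List.pairwise_cons.mpr ⟨hy, hys⟩⟩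
      intro b hb
      rcases List.mem_cons.mp hb with rfl | hb
      · exact le_of_lt hlt
      · exact le_trans (le_of_lt hlt) (hy b hb)
    · rw [decide_eq_true_eq, not_lt] at hlt
      refine List.pairwise_cons.mpr ⟨?_, ih hys⟩
      intro b hb
      rcases (PySem.List.mem_insertBy _ _ _ _).mp hb with rfl | hb
      · exact hlt
      · exact hy b hb

-- a stable sort only compares keys of the list's own elements
theorem sorted_congr_mem {α κ1 κ2 : Type} [LT κ1] [DecidableLT κ1] [LT κ2] [DecidableLT κ2]
    (k1 : α → κ1) (k2 : α → κ2) (xs : List α)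
    (h : ∀ a ∈ xs, ∀ b ∈ xs, decide (k1 a < k1 b) = decide (k2 a < k2 b)) :
    PySem.List.sorted xs k1 false = PySem.List.sorted xs k2 false := by
  rw [PySem.List.sorted_eq_foldl_insertBy, PySem.List.sorted_eq_foldl_insertBy]
  have aux : ∀ (l acc : List α), (∀ a ∈ l, a ∈ xs) → (∀ a ∈ acc, a ∈ xs) →
      l.foldl (fun acc x => PySem.List.insertBy (fun a b => decide (k1 a < k1 b)) x acc) acc
      = l.foldl (fun acc x => PySem.List.insertBy (fun a b => decide (k2 a < k2 b)) x acc) acc := by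
    intro l
    induction l with
    | nil => intro acc _ _; rfl
    | cons x l ih =>
      intro acc hl hacc
      rw [List.foldl_cons, List.foldl_cons,
        insertBy_congr (fun a b => decide (k1 a < k1 b)) (fun a b => decide (k2 a < k2 b))
          x acc (fun a ha => h x (hl x (by simp)) a (hacc a ha))]
      refine ih _ (fun a ha => hl a (by simp [ha])) ?_
      intro a ha
      rcases (PySem.List.mem_insertBy _ _ _ _).mp ha with rfl | ha
      · exact hl a (by simp)
      · exact hacc a ha
  exact aux xs [] (fun a ha => ha) (by simp)

-- filter a stable sort by one exact key value: the original subsequence (helper chain)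
theorem filter_insertBy {α κ : Type} [LinearOrder κ] (key : α → κ) (p : α → Bool) (x : α)
    (ys : List α) (h : ys.Pairwise (fun a b => key a ≤ key b)) :
    (PySem.List.insertBy (fun a b => decide (key a < key b)) x ys).filter p
      = if p x then PySem.List.insertBy (fun a b => decide (key a < key b)) x (ys.filter p)
        else ys.filter p := by
  induction ys with
  | nil =>
    show [x].filter p = _
    by_cases hp : p x <;> simp [hp, PySem.List.insertBy]
  | cons y ys ih =>
    rcases List.pairwise_cons.mp h with ⟨hy, hys⟩
    show (if decide (key x < key y) = true then x :: y :: ys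
        else y :: PySem.List.insertBy (fun a b => decide (key a < key b)) x ys).filter p = _
    by_cases hp : p x
    · rw [if_pos hp]
      by_cases hlt : decide (key x < key y) = true
      · rw [if_pos hlt, List.filter_cons_of_pos hp]
        rw [decide_eq_true_eq] at hlt
        rw [insertBy_all_before]
        intro z hz
        rcases List.mem_cons.mp (List.mem_of_mem_filter hz) with rfl | hz'
        · simpa using hlt
        · simpa using lt_of_lt_of_le hlt (hy z hz')
      · rw [if_neg hlt]
        by_cases hpy : p y
        · rw [List.filter_cons_of_pos hpy, List.filter_cons_of_pos hpy, ih hys, if_pos hp]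
          show y :: PySem.List.insertBy (fun a b => decide (key a < key b)) x (ys.filter p)
              = (if decide (key x < key y) = true then x :: y :: ys.filter p
                 else y :: PySem.List.insertBy (fun a b => decide (key a < key b)) x (ys.filter p))
          rw [if_neg hlt]
        · rw [List.filter_cons_of_neg (by simpa using hpy),
              List.filter_cons_of_neg (by simpa using hpy), ih hys, if_pos hp]
    · rw [if_neg hp]
      by_cases hlt : decide (key x < key y) = true
      · rw [if_pos hlt, List.filter_cons_of_neg (by simpa using hp)]
      · rw [if_neg hlt]
        by_cases hpy : p y
        · rw [List.filter_cons_of_pos hpy, List.filter_cons_of_pos hpy, ih hys, if_neg hp]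
        · rw [List.filter_cons_of_neg (by simpa using hpy),
              List.filter_cons_of_neg (by simpa using hpy), ih hys, if_neg hp]

-- a stable sort commutes with filtering
theorem filter_sorted {α κ : Type} [LinearOrder κ] (key : α → κ) (p : α → Bool) (xs : List α) :
    (PySem.List.sorted xs key false).filter p = PySem.List.sorted (xs.filter p) key false := by
  rw [PySem.List.sorted_eq_foldl_insertBy, PySem.List.sorted_eq_foldl_insertBy]
  have aux : ∀ (l acc : List α), acc.Pairwise (fun a b => key a ≤ key b) →
      (l.foldl (fun acc x => PySem.List.insertBy (fun a b => decide (key a < key b)) x acc)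
        acc).filter p
      = (l.filter p).foldl
          (fun acc x => PySem.List.insertBy (fun a b => decide (key a < key b)) x acc)
          (acc.filter p) := by
    intro l
    induction l with
    | nil => intro acc _; rfl
    | cons x l ih =>
      intro acc hacc
      rw [List.foldl_cons, ih _ (pairwise_insertBy key x acc hacc), filter_insertBy key p x acc hacc]
      by_cases hp : p x
      · rw [if_pos hp, List.filter_cons_of_pos hp, List.foldl_cons]
      · rw [if_neg hp, List.filter_cons_of_neg (by simpa using hp)]
  simpa using aux xs [] List.Pairwise.nil

theorem map_insertBy {α β κ : Type} [LT κ] [DecidableLT κ] (key : β → κ) (f : α → β) (x : α)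
    (l : List α) :
    PySem.List.insertBy (fun a b => decide (key a < key b)) (f x) (l.map f)
      = (PySem.List.insertBy (fun a b => decide (key (f a) < key (f b))) x l).map f := by
  induction l with
  | nil => rfl
  | cons y l ih =>
    show (if decide (key (f x) < key (f y)) = true then _ else _)
        = (if decide (key (f x) < key (f y)) = true then _
           else y :: PySem.List.insertBy (fun a b => decide (key (f a) < key (f b))) x l).map f
    by_cases hlt : decide (key (f x) < key (f y)) = true
    · rw [if_pos hlt, if_pos hlt]; rfl
    · rw [if_neg hlt, if_neg hlt, List.map_cons, ih]

-- a stable sort commutes with mapping (key pulled back)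
theorem sorted_map {α β κ : Type} [LT κ] [DecidableLT κ] (key : β → κ) (f : α → β)
    (xs : List α) :
    PySem.List.sorted (xs.map f) key false
      = (PySem.List.sorted xs (fun a => key (f a)) false).map f := by
  rw [PySem.List.sorted_eq_foldl_insertBy, PySem.List.sorted_eq_foldl_insertBy, List.foldl_map]
  have aux : ∀ (l acc : List α),
      l.foldl (fun acc x => PySem.List.insertBy (fun a b => decide (key a < key b)) (f x) acc)
        (acc.map f)
      = (l.foldl (fun acc x =>
          PySem.List.insertBy (fun a b => decide (key (f a) < key (f b))) x acc) acc).map f := by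
    intro l
    induction l with
    | nil => intro acc; rfl
    | cons x l ih =>
      intro acc
      rw [List.foldl_cons, List.foldl_cons, map_insertBy key f x acc, ih]
  simpa using aux xs []

-- on a y-sorted list, sorting by x is the same as sorting by the lexicographic (x, y)
theorem sorted_x_eq_sorted_lex {α : Type} (kx ky : α → Int) (xs : List α)
    (h : xs.Pairwise (fun a b => ky a ≤ ky b)) :
    PySem.List.sorted xs kx false
      = PySem.List.sorted xs (fun a => toLex (kx a, ky a)) false := by
  rw [PySem.List.sorted_eq_foldl_insertBy, PySem.List.sorted_eq_foldl_insertBy]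
  have aux : ∀ (l acc : List α), l.Pairwise (fun a b => ky a ≤ ky b) →
      (∀ e ∈ l, ∀ a ∈ acc, ky a ≤ ky e) →
      l.foldl (fun acc x => PySem.List.insertBy (fun a b => decide (kx a < kx b)) x acc) acc
      = l.foldl (fun acc x => PySem.List.insertBy
          (fun a b => decide (toLex (kx a, ky a) < toLex (kx b, ky b))) x acc) acc := by
    intro l
    induction l with
    | nil => intro acc _ _; rfl
    | cons e l ih =>
      intro acc hp hacc
      rcases List.pairwise_cons.mp hp with ⟨he, hl⟩
      rw [List.foldl_cons, List.foldl_cons,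
        insertBy_congr _ (fun a b => decide (toLex (kx a, ky a) < toLex (kx b, ky b))) e acc
          (by
            intro a hmem
            have hke : ky a ≤ ky e := hacc e (by simp) a hmem
            apply decide_eq_decide.mpr
            rw [Prod.Lex.lt_iff]
            simp only [ofLex_toLex]
            omega)]
      refine ih _ hl ?_
      intro e2 he2 a hmem
      rcases (PySem.List.mem_insertBy _ _ _ _).mp hmem with rfl | hmem
      · exact he e2 he2
      · exact le_trans (hacc e (by simp) a hmem) (he e2 he2)
  exact aux xs [] h (by simp)

-- sorted2's tuple key is the lexicographic order
theorem sorted2_eq_sorted_lex {α : Type} (kx ky : α → Int) (xs : List α) :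
    PySem.List.sorted2 xs kx ky false
      = PySem.List.sorted xs (fun a => toLex (kx a, ky a)) false := by
  rw [PySem.List.sorted_eq_foldl_insertBy]
  show xs.foldl (fun acc x => PySem.List.insertBy
      (fun a b => decide (kx a < kx b) || (!decide (kx b < kx a) && decide (ky a < ky b)))
      x acc) []
    = _
  have hb : (fun (a b : α) =>
        decide (kx a < kx b) || (!decide (kx b < kx a) && decide (ky a < ky b)))
      = (fun (a b : α) => decide (toLex (kx a, ky a) < toLex (kx b, ky b))) := by
    funext a b
    rw [Bool.eq_iff_iff]
    simp only [Bool.or_eq_true, Bool.and_eq_true, Bool.not_eq_true', decide_eq_true_eq,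
      decide_eq_false_iff_not, Prod.Lex.lt_iff, ofLex_toLex]
    omega
  rw [hb]

-- a key-sorted list is determined by its per-key-value subsequences
theorem sorted_unique {α κ : Type} [LinearOrder κ] (key : α → κ) (l₁ : List α) :
    ∀ (l₂ : List α), l₁.Pairwise (fun a b => key a ≤ key b) →
    l₂.Pairwise (fun a b => key a ≤ key b) →
    (∀ c, l₁.filter (fun a => decide (key a = c)) = l₂.filter (fun a => decide (key a = c))) →
    l₁ = l₂ := by
  induction l₁ with
  | nil =>
    intro l₂ _ _ hf
    cases l₂ with
    | nil => rfl
    | cons b t₂ =>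
      have h := hf (key b)
      rw [List.filter_cons_of_pos (by simp)] at h
      simp at h
  | cons a t ih =>
    intro l₂ h1 h2 hf
    rcases List.pairwise_cons.mp h1 with ⟨ha, ht⟩
    cases l₂ with
    | nil =>
      have h := hf (key a)
      rw [List.filter_cons_of_pos (by simp)] at h
      simp at h
    | cons b t₂ =>
      rcases List.pairwise_cons.mp h2 with ⟨hb, ht₂⟩
      have hab : key b = key a := by
        by_contra hne
        have h1x := hf (key a)
        rw [List.filter_cons_of_pos (by simp),
            List.filter_cons_of_neg (by simpa using hne)] at h1x
        have hat2 : a ∈ t₂ :=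
          List.mem_of_mem_filter (h1x ▸ List.mem_cons_self (l := List.filter _ t))
        have h2x := hf (key b)
        rw [List.filter_cons_of_neg (by simpa using fun h => hne h.symm),
            List.filter_cons_of_pos (by simp)] at h2x
        have hbt : b ∈ t :=
          List.mem_of_mem_filter (h2x.symm ▸ List.mem_cons_self (l := List.filter _ t₂))
        exact hne (le_antisymm (hb a hat2) (ha b hbt))
      have hmain := hf (key a)
      rw [List.filter_cons_of_pos (by simp), List.filter_cons_of_pos (by simpa using hab)]
        at hmain
      rcases List.cons.injEq _ _ _ _ ▸ hmain with ⟨rfl, _⟩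
      congr 1
      apply ih t₂ ht ht₂
      intro c
      by_cases hc : key a = c
      · have hx := hf c
        rw [List.filter_cons_of_pos (by simpa using hc),
            List.filter_cons_of_pos (by simpa using hab.trans hc)] at hx
        exact (List.cons.injEq _ _ _ _ ▸ hx).2
      · have hx := hf c
        rw [List.filter_cons_of_neg (by simpa using hc),
            List.filter_cons_of_neg (by simpa using fun h => hc (hab ▸ h))] at hx
        exact hx

-- filtering one key-value out of a stable sort gives the original subsequence
theorem filter_key_eq_sorted {α κ : Type} [LinearOrder κ] (key : α → κ) (c : κ) (ys : List α) :
    (PySem.List.sorted ys key false).filter (fun a => decide (key a = c))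
      = ys.filter (fun a => decide (key a = c)) := by
  rw [filter_sorted]
  apply PySem.List.sorted_eq_self_of_pairwise
  apply List.pairwise_of_forall_mem_list
  intro x hx y hy
  have hx2 := of_decide_eq_true (List.mem_filter.mp hx).2
  have hy2 := of_decide_eq_true (List.mem_filter.mp hy).2
  rw [hx2, hy2]

-- pre-sorting by y does not change the lexicographic (x, y) sort
theorem sorted_presorted {α : Type} (kx ky : α → Int) (xs : List α) :
    PySem.List.sorted (PySem.List.sorted xs ky false) (fun a => toLex (kx a, ky a)) false
      = PySem.List.sorted xs (fun a => toLex (kx a, ky a)) false := by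
  apply sorted_unique (fun a => toLex (kx a, ky a)) _ _
    (PySem.List.sorted_pairwise _ _) (PySem.List.sorted_pairwise _ _)
  intro c
  rw [filter_key_eq_sorted, filter_key_eq_sorted, filter_sorted]
  apply PySem.List.sorted_eq_self_of_pairwise
  apply List.pairwise_of_forall_mem_list
  intro x hx y hy
  have hx2 := of_decide_eq_true (List.mem_filter.mp hx).2
  have hy2 := of_decide_eq_true (List.mem_filter.mp hy).2
  have ex : ky x = (ofLex c).2 := by
    have := congrArg (fun z => (ofLex z).2) hx2
    simpa using this
  have ey : ky y = (ofLex c).2 := by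
    have := congrArg (fun z => (ofLex z).2) hy2
    simpa using this
  rw [ex, ey]

-- A's sort-then-sort of a line equals a single sort by the tuple key (x, y)
theorem sorted_sorted_eq_sorted2 {α : Type} (kx ky : α → Int) (xs : List α) :
    PySem.List.sorted (PySem.List.sorted xs ky false) kx false
      = PySem.List.sorted2 xs kx ky false := by
  rw [sorted_x_eq_sorted_lex kx ky _ (PySem.List.sorted_pairwise xs (fun a => ky a)),
      sorted_presorted, sorted2_eq_sorted_lex]

-- B's single sort by (flag, x, y) splits into the flag=false part followed by the flag=true part
theorem sorted_flag_split {α : Type} (p : α → Bool) (kx ky : α → Int) (xs : List α) :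
    PySem.List.sorted xs (fun c => toLex (p c, toLex (kx c, ky c))) false
      = PySem.List.sorted (xs.filter (fun c => !(p c)))
          (fun c => toLex (p c, toLex (kx c, ky c))) false
        ++ PySem.List.sorted (xs.filter p)
          (fun c => toLex (p c, toLex (kx c, ky c))) false := by
  apply sorted_unique (fun c => toLex (p c, toLex (kx c, ky c)))
  · exact PySem.List.sorted_pairwise _ _
  · rw [List.pairwise_append]
    refine ⟨PySem.List.sorted_pairwise _ _, PySem.List.sorted_pairwise _ _, ?_⟩
    intro a ha b hb
    have hpa : p a = false := by
      have := (List.mem_filter.mp ((PySem.List.mem_sorted _ _ _ _).mp ha)).2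
      simpa using this
    have hpb : p b = true := (List.mem_filter.mp ((PySem.List.mem_sorted _ _ _ _).mp hb)).2
    apply le_of_lt
    rw [Prod.Lex.lt_iff]
    left
    simp [hpa, hpb]
  · intro c
    rw [filter_key_eq_sorted, List.filter_append, filter_key_eq_sorted, filter_key_eq_sorted,
      List.filter_filter, List.filter_filter]
    by_cases hc : (ofLex c).1 = true
    · have h1 : xs.filter (fun a => decide (toLex (p a, toLex (kx a, ky a)) = c) && !p a)
          = [] := by
        apply List.filter_eq_nil_iff.mpr
        intro a _
        cases hk : decide (toLex (p a, toLex (kx a, ky a)) = c) with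
        | false => simp
        | true =>
          have hpa : p a = (ofLex c).1 := by
            have := congrArg (fun z => (ofLex z).1) (of_decide_eq_true hk)
            simpa using this
          simp [hpa, hc]
      have h2 : xs.filter (fun a => decide (toLex (p a, toLex (kx a, ky a)) = c) && p a)
          = xs.filter (fun a => decide (toLex (p a, toLex (kx a, ky a)) = c)) := by
        apply List.filter_congr
        intro a _
        cases hk : decide (toLex (p a, toLex (kx a, ky a)) = c) with
        | false => simp
        | true =>
          have hpa : p a = (ofLex c).1 := by
            have := congrArg (fun z => (ofLex z).1) (of_decide_eq_true hk)
            simpa using this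
          simp [hpa, hc]
      rw [h1, h2, List.nil_append]
    · have hc' : (ofLex c).1 = false := by
        cases hv : (ofLex c).1
        · rfl
        · exact absurd hv hc
      have h1 : xs.filter (fun a => decide (toLex (p a, toLex (kx a, ky a)) = c) && p a)
          = [] := by
        apply List.filter_eq_nil_iff.mpr
        intro a _
        cases hk : decide (toLex (p a, toLex (kx a, ky a)) = c) with
        | false => simp
        | true =>
          have hpa : p a = (ofLex c).1 := by
            have := congrArg (fun z => (ofLex z).1) (of_decide_eq_true hk)
            simpa using this
          simp [hpa, hc']
      have h2 : xs.filter (fun a => decide (toLex (p a, toLex (kx a, ky a)) = c) && !p a)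
          = xs.filter (fun a => decide (toLex (p a, toLex (kx a, ky a)) = c)) := by
        apply List.filter_congr
        intro a _
        cases hk : decide (toLex (p a, toLex (kx a, ky a)) = c) with
        | false => simp
        | true =>
          have hpa : p a = (ofLex c).1 := by
            have := congrArg (fun z => (ofLex z).1) (of_decide_eq_true hk)
            simpa using this
          simp [hpa, hc']
      rw [h1, h2, List.append_nil]

-- within one row (constant flag) the (flag, x, y) sort is the (x, y) sort
theorem sorted_flag_const {α : Type} (p : α → Bool) (v : Bool) (kx ky : α → Int) (xs : List α)
    (h : ∀ a ∈ xs, p a = v) :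
    PySem.List.sorted xs (fun c => toLex (p c, toLex (kx c, ky c))) false
      = PySem.List.sorted2 xs kx ky false := by
  rw [sorted2_eq_sorted_lex]
  apply sorted_congr_mem
  intro a ha b hb
  apply decide_eq_decide.mpr
  rw [Prod.Lex.lt_iff, Prod.Lex.lt_iff]
  rw [Prod.Lex.lt_iff]
  simp only [ofLex_toLex, h a ha, h b hb]
  constructor
  · rintro (h1 | ⟨-, h2⟩)
    · exact absurd h1 (lt_irrefl v)
    · exact h2
  · exact fun h1 => Or.inr ⟨by trivial, h1⟩

-- "".join over ++ distributes
-- "".join is concatenation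
theorem join_empty_eq_flatten : ∀ (l : List (List Char)), PySem.Chars.join [] l = l.flatten
  | [] => PySem.Chars.join_nil []
  | [p] => by rw [PySem.Chars.join_singleton]; simp
  | p :: q :: rest => by
      rw [PySem.Chars.join_cons_cons, join_empty_eq_flatten (q :: rest)]; simp

theorem join_empty_append (a b : List String) :
    PySem.Str.join "" (a ++ b) = PySem.Str.join "" a ++ PySem.Str.join "" b := by
  apply String.toList_inj.mp
  rw [String.toList_append, PySem.Str.toList_join, PySem.Str.toList_join, PySem.Str.toList_join]
  have he : "".toList = ([] : List Char) := rfl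
  rw [he, join_empty_eq_flatten, join_empty_eq_flatten, join_empty_eq_flatten,
    List.map_append, List.flatten_append]

-- the dash-pass fold, once the dash has been emitted: plain appending
theorem fold_dash_true (thr : Int) (l : List (String × (Int × Int))) (parts : List String) :
    l.foldl (fun (s : List String × Bool) c =>
        let s' := if thr ≤ c.2.2 ∧ s.2 = false then (s.1 ++ ["-"], true) else s
        (s'.1 ++ [c.1], s'.2)) (parts, true)
      = (parts ++ l.map (fun c => c.1), true) := by
  induction l generalizing parts with
  | nil => simp
  | cons c l ih =>
    rw [List.foldl_cons]
    simp only [Bool.true_eq_false, and_false, if_false]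
    simpa using ih (parts ++ [c.1])

-- the dash-pass fold over the first row: no dash, characters appended
theorem fold_dash_low (thr : Int) (l : List (String × (Int × Int))) (parts : List String)
    (h : ∀ c ∈ l, c.2.2 < thr) :
    l.foldl (fun (s : List String × Bool) c =>
        let s' := if thr ≤ c.2.2 ∧ s.2 = false then (s.1 ++ ["-"], true) else s
        (s'.1 ++ [c.1], s'.2)) (parts, false)
      = (parts ++ l.map (fun c => c.1), false) := by
  induction l generalizing parts with
  | nil => simp
  | cons c l ih =>
    rw [List.foldl_cons]
    split_ifs with hif
    · exact absurd (h c (by simp)) (not_lt.mpr hif.1)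
    · simpa using ih (parts ++ [c.1]) (fun d hd => h d (by simp [hd]))

-- the dash-pass fold over the second row: one dash, then the characters
theorem fold_dash_high (thr : Int) (c : String × (Int × Int)) (l : List (String × (Int × Int)))
    (parts : List String) (h : ∀ d ∈ c :: l, thr ≤ d.2.2) :
    (c :: l).foldl (fun (s : List String × Bool) c =>
        let s' := if thr ≤ c.2.2 ∧ s.2 = false then (s.1 ++ ["-"], true) else s
        (s'.1 ++ [c.1], s'.2)) (parts, false)
      = (parts ++ "-" :: (c :: l).map (fun d => d.1), true) := by
  rw [List.foldl_cons]
  split_ifs with hif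
  · simpa using fold_dash_true thr l (parts ++ ["-"] ++ [c.1])
  · exact absurd ⟨h c (by simp), rfl⟩ hif

-- B's running min? over the mapped ys equals the y of the head of A's y-sorted list
theorem min_map_eq_head_sorted (candidates : List (String × (Int × Int)))
    (m : String × (Int × Int)) (t : List (String × (Int × Int))) (mv : Int)
    (hmv : PySem.List.min? (candidates.map (fun c => c.2.2)) (fun v => v) = some mv)
    (hs : PySem.List.sorted candidates (fun c => c.2.2) false = m :: t) :
    mv = m.2.2 := by
  have hmmem : m ∈ candidates := (PySem.List.mem_sorted _ _ _ _).mp (hs ▸ List.mem_cons_self)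
  have hmin := PySem.List.key_head_sorted_le candidates (fun c => c.2.2) hs
  apply le_antisymm
  · exact PySem.List.min?_isMin hmv m.2.2 (List.mem_map_of_mem hmmem)
  · rcases List.mem_map.mp (PySem.List.min?_mem hmv) with ⟨y, hy, hv⟩
    rw [← hv]
    exact hmin y hy

-- ===== VERDICT (by name: the statement is the Claim_ definition above) =====
theorem format_license_plate_spec : Claim_equal_format_license_plate := by
  intro candidates _ hpre
  unfold Spec_format_license_plate format_license_plate format_license_plate_alt
  obtain ⟨m, t, hs⟩ : ∃ m t,
      PySem.List.sorted candidates (fun c => c.2.2) false = m :: t := by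
    cases hsort : PySem.List.sorted candidates (fun c => c.2.2) false with
    | nil => exact absurd ((PySem.List.sorted_eq_nil_iff _ _ _).mp hsort) hpre
    | cons m t => exact ⟨m, t, rfl⟩
  obtain ⟨mv, hmv⟩ : ∃ mv,
      PySem.List.min? (candidates.map (fun c => c.2.2)) (fun v => v) = some mv := by
    cases hm : PySem.List.min? (candidates.map (fun c => c.2.2)) (fun v => v) with
    | none =>
      rw [PySem.List.min?_eq_none_iff, List.map_eq_nil_iff] at hm
      exact absurd hm hpre
    | some mv => exact ⟨mv, rfl⟩
  have hgetA : PySem.List.pyGet? (PySem.List.sorted candidates (fun c => c.2.2) false) 0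
      = some m := by rw [hs]; exact PySem.List.pyGet?_zero_cons m t
  have hmveq : mv = m.2.2 := min_map_eq_head_sorted candidates m t mv hmv hs
  -- A's partition fold is the pair of threshold filters (mapped to (char, x))
  have hfold : ∀ (l : List (String × (Int × Int))),
      l.foldl (fun (s : List (String × Int) × List (String × Int)) c =>
          if c.2.2 < m.2.2 + 40 then (s.1 ++ [(c.1, c.2.1)], s.2)
          else (s.1, s.2 ++ [(c.1, c.2.1)])) ([], [])
      = ((l.filter (fun c => decide (c.2.2 < m.2.2 + 40))).map (fun c => (c.1, c.2.1)),
         (l.filter (fun c => decide (m.2.2 + 40 ≤ c.2.2))).map (fun c => (c.1, c.2.1))) := by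
    intro l
    rw [show (fun (s : List (String × Int) × List (String × Int)) (c : String × (Int × Int)) =>
          if c.2.2 < m.2.2 + 40 then (s.1 ++ [(c.1, c.2.1)], s.2)
          else (s.1, s.2 ++ [(c.1, c.2.1)]))
        = (fun s c =>
          ((if c.2.2 < m.2.2 + 40 then s.1 ++ [(c.1, c.2.1)] else s.1),
           (if m.2.2 + 40 ≤ c.2.2 then s.2 ++ [(c.1, c.2.1)] else s.2))) from by
          funext s c
          dsimp only
          split_ifs <;> first | rfl | omega]
    refine Eq.trans (PySem.List.foldl_prod_mk
        (fun (s : List (String × Int)) (c : String × (Int × Int)) =>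
          if c.2.2 < m.2.2 + 40 then s ++ [(c.1, c.2.1)] else s)
        (fun (s : List (String × Int)) (c : String × (Int × Int)) =>
          if m.2.2 + 40 ≤ c.2.2 then s ++ [(c.1, c.2.1)] else s) l [] []) ?_
    rw [Prod.mk.injEq]
    constructor
    · simpa using PySem.List.foldl_append_ite
        (fun c : String × (Int × Int) => c.2.2 < m.2.2 + 40) (fun c => (c.1, c.2.1)) l []
    · simpa using PySem.List.foldl_append_ite
        (fun c : String × (Int × Int) => m.2.2 + 40 ≤ c.2.2) (fun c => (c.1, c.2.1)) l []
  -- B's single sort splits into the two rows, each sorted2 by (x, y)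
  have hsplit : PySem.List.sorted candidates
      (fun c => toLex (decide (mv + 40 ≤ c.2.2), toLex (c.2.1, c.2.2))) false
      = PySem.List.sorted2
          (candidates.filter (fun c => decide (c.2.2 < m.2.2 + 40)))
          (fun c => c.2.1) (fun c => c.2.2) false
        ++ PySem.List.sorted2
          (candidates.filter (fun c => decide (m.2.2 + 40 ≤ c.2.2)))
          (fun c => c.2.1) (fun c => c.2.2) false := by
    subst hmveq
    rw [sorted_flag_split (fun c => decide (m.2.2 + 40 ≤ c.2.2)) (fun c => c.2.1)
      (fun c => c.2.2) candidates]
    congr 1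
    · rw [show (fun (c : String × (Int × Int)) => !decide (m.2.2 + 40 ≤ c.2.2))
          = (fun c => decide (c.2.2 < m.2.2 + 40)) from by
          funext c
          by_cases hcc : m.2.2 + 40 ≤ c.2.2
          · simp [hcc, not_lt.mpr hcc]
          · simp [hcc, not_le.mp hcc]]
      apply sorted_flag_const _ false
      intro a ha
      have := (List.mem_filter.mp ha).2
      simp only [decide_eq_true_eq] at this
      simp [not_le.mpr this]
    · apply sorted_flag_const _ true
      intro a ha
      exact (List.mem_filter.mp ha).2
  simp only [hgetA, hmv, hfold, hsplit]
  rw [filter_sorted (fun c : String × (Int × Int) => c.2.2)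
        (fun c => decide (c.2.2 < m.2.2 + 40)) candidates,
      filter_sorted (fun c : String × (Int × Int) => c.2.2)
        (fun c => decide (m.2.2 + 40 ≤ c.2.2)) candidates]
  simp only [sorted_map, sorted_sorted_eq_sorted2]
  -- both sides in terms of F2 and S2
  generalize hF : PySem.List.sorted2
      (candidates.filter (fun c => decide (c.2.2 < m.2.2 + 40)))
      (fun c => c.2.1) (fun c => c.2.2) false = F2
  generalize hS : PySem.List.sorted2
      (candidates.filter (fun c => decide (m.2.2 + 40 ≤ c.2.2)))
      (fun c => c.2.1) (fun c => c.2.2) false = S2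
  have hFlow : ∀ c ∈ F2, c.2.2 < m.2.2 + 40 := by
    intro c hc
    have : c ∈ candidates.filter (fun c => decide (c.2.2 < m.2.2 + 40)) :=
      (PySem.List.sorted2_perm _ _ _ _).mem_iff.mp (hF ▸ hc)
    simpa using (List.mem_filter.mp this).2
  have hShigh : ∀ c ∈ S2, m.2.2 + 40 ≤ c.2.2 := by
    intro c hc
    have : c ∈ candidates.filter (fun c => decide (m.2.2 + 40 ≤ c.2.2)) :=
      (PySem.List.sorted2_perm _ _ _ _).mem_iff.mp (hS ▸ hc)
    simpa using (List.mem_filter.mp this).2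
  rw [List.foldl_append, hmveq, fold_dash_low (m.2.2 + 40) F2 [] hFlow]
  simp only [List.nil_append, List.map_map, Function.comp_def]
  cases S2 with
  | nil => simp
  | cons c rest =>
    rw [fold_dash_high (m.2.2 + 40) c rest _ hShigh]
    simp only [List.length_map, List.length_cons]
    rw [if_neg (by simp)]
    rw [show F2.map (fun c => c.1) ++ "-" :: (c :: rest).map (fun d => d.1)
        = F2.map (fun c => c.1) ++ (["-"] ++ (c :: rest).map (fun d => d.1)) from by simp]
    rw [← List.append_assoc, join_empty_append, join_empty_append]
    simp [PySem.Str.join]
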